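-- pv_equiv track=rewrite | github.com/SrimanthNarayanan/Clara.ai | streamlit.py | build_schema_card
-- ===== SOURCE A (Python) =====
-- from collections import defaultdict
--
-- def build_schema_card(columns: list[dict], fks: list[dict], tables_filter: set[str] | None = None) -> str:
--     table_cols = defaultdict(list)
--     for c in columns:
--         full_table_name = f"{c.get('TABLE_SCHEMA', 'PUBLIC')}.{c['TABLE_NAME']}"
--         if tables_filter and full_table_name not in tables_filter: continue
--         table_cols[full_table_name].append(f"{c['COLUMN_NAME']}:{c['DATA_TYPE']}")
--     fk_lines = []
--     for fk in fks:
--         parent_full = f"{fk.get('TABLE_SCHEMA', 'PUBLIC')}.{fk['TABLE_NAME']}"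
--         ref_full = f"{fk.get('REF_SCHEMA', 'PUBLIC')}.{fk['REF_TABLE']}"
--         if tables_filter and (parent_full not in tables_filter or ref_full not in tables_filter): continue
--         fk_lines.append(f"- {parent_full}.{fk['COLUMN_NAME']} -> {ref_full}.{fk['REF_COLUMN']}")
--     lines = ["Schema (relevant tables and columns):"]
--     for table, cols in sorted(table_cols.items()):
--         lines.append(f"* {table}: {', '.join(cols)}")
--     if fk_lines:
--         lines.append("\nRelationships:")
--         lines.extend(fk_lines)
--     return "\n".join(lines)
-- ===== SOURCE B (Python) =====
-- def build_schema_card(columns: list[dict], fks: list[dict], tables_filter: set[str] | None = None) -> str: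
--     def keep(t):
--         return not tables_filter or t in tables_filter
--     pairs = []
--     for c in columns:
--         t = f"{c.get('TABLE_SCHEMA', 'PUBLIC')}.{c['TABLE_NAME']}"
--         if keep(t):
--             pairs.append((t, f"{c['COLUMN_NAME']}:{c['DATA_TYPE']}"))
--     tables = sorted(dict.fromkeys(t for t, _ in pairs))
--     lines = ["Schema (relevant tables and columns):"]
--     for t in tables:
--         lines.append(f"* {t}: {', '.join(v for k, v in pairs if k == t)}")
--     fk_lines = []
--     for fk in fks:
--         p = f"{fk.get('TABLE_SCHEMA', 'PUBLIC')}.{fk['TABLE_NAME']}"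
--         r = f"{fk.get('REF_SCHEMA', 'PUBLIC')}.{fk['REF_TABLE']}"
--         if keep(p) and keep(r):
--             fk_lines.append(f"- {p}.{fk['COLUMN_NAME']} -> {r}.{fk['REF_COLUMN']}")
--     if fk_lines:
--         lines.append("\nRelationships:")
--         lines.extend(fk_lines)
--     return "\n".join(lines)
-- ===== Notes on version B (the rewrite author's own statement) =====
-- stated objective: alternative
-- what changed: B drops the defaultdict grouping and the final sorted(items): it builds a flat list of (full_table_name, 'COL:TYPE') pairs in input order, sorts the ordered-dedup of the table names, and emits each table line by scanning the pair list for that table, keeping the fk loop and assembly as in A.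
import Mathlib
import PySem

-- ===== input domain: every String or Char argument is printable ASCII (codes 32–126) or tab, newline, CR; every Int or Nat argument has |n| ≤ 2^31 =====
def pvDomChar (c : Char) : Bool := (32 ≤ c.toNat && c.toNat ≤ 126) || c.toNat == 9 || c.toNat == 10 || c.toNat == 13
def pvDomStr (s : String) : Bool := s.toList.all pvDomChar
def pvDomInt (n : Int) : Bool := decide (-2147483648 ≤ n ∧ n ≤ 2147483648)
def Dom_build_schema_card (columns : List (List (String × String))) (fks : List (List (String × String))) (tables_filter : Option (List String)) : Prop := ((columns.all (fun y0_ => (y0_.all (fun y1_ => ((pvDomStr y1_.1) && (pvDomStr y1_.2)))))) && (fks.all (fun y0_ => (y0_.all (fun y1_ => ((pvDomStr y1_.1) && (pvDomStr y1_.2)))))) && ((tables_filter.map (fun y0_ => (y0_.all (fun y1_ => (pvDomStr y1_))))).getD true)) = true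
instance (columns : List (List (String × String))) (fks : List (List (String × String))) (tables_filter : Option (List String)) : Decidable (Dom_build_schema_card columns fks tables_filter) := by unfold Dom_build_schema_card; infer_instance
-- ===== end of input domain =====

-- B replaces A's defaultdict grouping + sorted(items) by a flat (table, column) pair list, a sorted
-- ordered-dedup of its table names and a per-table scan of that list (objective: alternative decomposition).

-- shared helpers: the f-string pieces both Pythons contain verbatim
-- d.get(k) as first-match lookup on the association list
def pvGet? (d : List (String × String)) (k : String) : Option String :=
  (d.find? (fun p => p.1 == k)).map (·.2)
-- d.get(k, dflt)
def pvGetD (d : List (String × String)) (k dflt : String) : String :=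
  (pvGet? d k).getD dflt
-- total stand-in for Python's d[k]; Pre_ guarantees the key is present wherever it is evaluated
def pvItem (d : List (String × String)) (k : String) : String :=
  pvGetD d k ""
-- f"{d.get('TABLE_SCHEMA', 'PUBLIC')}.{d['TABLE_NAME']}"
def pvFullName (d : List (String × String)) : String :=
  pvGetD d "TABLE_SCHEMA" "PUBLIC" ++ "." ++ pvItem d "TABLE_NAME"
-- f"{d.get('REF_SCHEMA', 'PUBLIC')}.{d['REF_TABLE']}"
def pvRefName (d : List (String × String)) : String :=
  pvGetD d "REF_SCHEMA" "PUBLIC" ++ "." ++ pvItem d "REF_TABLE"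
-- f"{c['COLUMN_NAME']}:{c['DATA_TYPE']}"
def pvColStr (c : List (String × String)) : String :=
  pvItem c "COLUMN_NAME" ++ ":" ++ pvItem c "DATA_TYPE"
-- f"- {p}.{fk['COLUMN_NAME']} -> {r}.{fk['REF_COLUMN']}"
def pvFkLine (fk : List (String × String)) : String :=
  "- " ++ pvFullName fk ++ "." ++ pvItem fk "COLUMN_NAME" ++ " -> " ++ pvRefName fk ++ "." ++ pvItem fk "REF_COLUMN"
-- truthiness of the set-or-None tables_filter
def pvTruthy (tf : Option (List String)) : Bool :=
  match tf with | none => false | some l => !l.isEmpty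
-- 'full_table_name in tables_filter' (only reached by A when tf is truthy)
def pvMem (tf : Option (List String)) (t : String) : Bool :=
  match tf with | none => false | some l => l.contains t
-- B's keep(t) = not tables_filter or t in tables_filter
def pvKeep (tf : Option (List String)) (t : String) : Bool :=
  match tf with | none => true | some l => l.isEmpty || l.contains t

-- ===== PORT A =====
-- dict keys are unique, so Python's tuple sort of table_cols.items() orders by the key alone
def build_schema_card (columns : List (List (String × String))) (fks : List (List (String × String))) (tables_filter : Option (List String)) : String :=
  let table_cols := columns.foldl (fun d c =>
      let full := pvFullName c
      if pvTruthy tables_filter && !pvMem tables_filter full then d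
      else d.modify full [] (fun v => v ++ [pvColStr c])) PySem.Dict.empty
  let fk_lines := fks.foldl (fun acc fk =>
      let p := pvFullName fk
      let r := pvRefName fk
      if pvTruthy tables_filter && (!pvMem tables_filter p || !pvMem tables_filter r) then acc
      else acc ++ [pvFkLine fk]) []
  let lines := ["Schema (relevant tables and columns):"] ++
      (PySem.List.sorted table_cols.items (fun p => p.1)).map
        (fun p => "* " ++ p.1 ++ ": " ++ PySem.Str.join ", " p.2)
  let lines := if fk_lines.isEmpty then lines else lines ++ ["\nRelationships:"] ++ fk_lines
  PySem.Str.join "\n" lines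

-- ===== PORT B =====
def build_schema_card_alt (columns : List (List (String × String))) (fks : List (List (String × String))) (tables_filter : Option (List String)) : String :=
  let pairs := columns.foldl (fun ps c =>
      let t := pvFullName c
      if pvKeep tables_filter t then ps ++ [(t, pvColStr c)] else ps) []
  let tables := PySem.List.sorted (PySem.List.dedup (pairs.map (·.1))) (fun t => t)
  let lines := ["Schema (relevant tables and columns):"] ++
      tables.map (fun t => "* " ++ t ++ ": " ++
        PySem.Str.join ", " ((pairs.filter (fun p => p.1 == t)).map (·.2)))
  let fk_lines := fks.foldl (fun acc fk =>
      let p := pvFullName fk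
      let r := pvRefName fk
      if pvKeep tables_filter p && pvKeep tables_filter r then acc ++ [pvFkLine fk] else acc) []
  let lines := if fk_lines.isEmpty then lines else lines ++ ["\nRelationships:"] ++ fk_lines
  PySem.Str.join "\n" lines

-- ===== PRECONDITION & SPEC =====
-- 'k in d' for the association-list dict
def pvHasKey (d : List (String × String)) (k : String) : Bool :=
  d.any (fun p => p.1 == k)

-- Pre_ = exactly the inputs where Python A raises no KeyError: every column dict has 'TABLE_NAME'
-- (evaluated before the filter) and, if it passes the filter, 'COLUMN_NAME' and 'DATA_TYPE'; every fk
-- dict has 'TABLE_NAME' and 'REF_TABLE' and, if both ends pass the filter, 'COLUMN_NAME' and 'REF_COLUMN'.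
def Pre_build_schema_card (columns : List (List (String × String))) (fks : List (List (String × String))) (tables_filter : Option (List String)) : Prop :=
  (∀ c ∈ columns, pvHasKey c "TABLE_NAME" = true ∧
    (pvKeep tables_filter (pvFullName c) = true →
      pvHasKey c "COLUMN_NAME" = true ∧ pvHasKey c "DATA_TYPE" = true)) ∧
  (∀ fk ∈ fks, pvHasKey fk "TABLE_NAME" = true ∧ pvHasKey fk "REF_TABLE" = true ∧
    ((pvKeep tables_filter (pvFullName fk) && pvKeep tables_filter (pvRefName fk)) = true →
      pvHasKey fk "COLUMN_NAME" = true ∧ pvHasKey fk "REF_COLUMN" = true))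
instance (columns : List (List (String × String))) (fks : List (List (String × String))) (tables_filter : Option (List String)) : Decidable (Pre_build_schema_card columns fks tables_filter) := by unfold Pre_build_schema_card; infer_instance

def pvWitness_build_schema_card : (List (List (String × String))) × (List (List (String × String))) × Option (List String) :=
  ([[("TABLE_NAME", "users"), ("COLUMN_NAME", "id"), ("DATA_TYPE", "int")]],
   [[("TABLE_NAME", "users"), ("REF_TABLE", "users"), ("COLUMN_NAME", "id"), ("REF_COLUMN", "id")]],
   none)

def Spec_build_schema_card (columns : List (List (String × String))) (fks : List (List (String × String))) (tables_filter : Option (List String)) (out : String) : Prop := out = build_schema_card_alt columns fks tables_filter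
instance (columns : List (List (String × String))) (fks : List (List (String × String))) (tables_filter : Option (List String)) (out : String) : Decidable (Spec_build_schema_card columns fks tables_filter out) := by unfold Spec_build_schema_card; infer_instance

-- ===== CLAIM (what is proved, stated in full; the proofs are below) =====
def Claim_equal_build_schema_card : Prop := ∀ (columns : List (List (String × String))) (fks : List (List (String × String))) (tables_filter : Option (List String)), Dom_build_schema_card columns fks tables_filter → Pre_build_schema_card columns fks tables_filter → Spec_build_schema_card columns fks tables_filter (build_schema_card columns fks tables_filter)

-- ===== LEMMAS AND PROOFS =====

-- A's skip test on a column is the negation of B's keep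
theorem pv_cond_col (tf : Option (List String)) (t : String) :
    (pvTruthy tf && !pvMem tf t) = !pvKeep tf t := by
  cases tf with
  | none => rfl
  | some l => cases l <;> simp [pvTruthy, pvMem, pvKeep]

-- A's skip test on a foreign key is the negation of B's keep-both
theorem pv_cond_fk (tf : Option (List String)) (p r : String) :
    (pvTruthy tf && (!pvMem tf p || !pvMem tf r)) = !(pvKeep tf p && pvKeep tf r) := by
  cases tf with
  | none => rfl
  | some l =>
    by_cases hE : l.isEmpty <;> by_cases hp : l.contains p <;> by_cases hr : l.contains r <;>
      simp [pvTruthy, pvMem, pvKeep, hE]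

-- A's grouping loop over the columns is the plain modify-fold over B's kept (table, column) pairs
theorem pv_dict_fold (tf : Option (List String)) (cols : List (List (String × String)))
    (d : PySem.Dict String (List String)) :
    cols.foldl (fun d c =>
        if pvTruthy tf && !pvMem tf (pvFullName c) then d
        else d.modify (pvFullName c) [] (fun v => v ++ [pvColStr c])) d =
      ((cols.filter (fun c => pvKeep tf (pvFullName c))).map
          (fun c => (pvFullName c, pvColStr c))).foldl
        (fun d p => d.modify p.1 [] (fun v => v ++ [p.2])) d := by
  induction cols generalizing d with
  | nil => rfl
  | cons c cs ih =>
    have hA := pv_cond_col tf (pvFullName c)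
    by_cases h : pvKeep tf (pvFullName c) = true
    · simp only [List.foldl_cons, List.filter_cons, hA, h, Bool.not_true, Bool.false_eq_true,
        if_false, if_true, List.map_cons]
      exact ih _
    · have h' : pvKeep tf (pvFullName c) = false := by simpa using h
      simp only [List.foldl_cons, List.filter_cons, hA, h', Bool.not_false, Bool.false_eq_true,
        if_false, if_true]
      exact ih _

-- B's pair-building loop
theorem pv_pairs_fold (tf : Option (List String)) (cols : List (List (String × String))) :
    cols.foldl (fun ps c =>
        if pvKeep tf (pvFullName c) then ps ++ [(pvFullName c, pvColStr c)] else ps)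
      ([] : List (String × String)) =
      (cols.filter (fun c => pvKeep tf (pvFullName c))).map
        (fun c => (pvFullName c, pvColStr c)) := by
  simpa using PySem.List.foldl_append_if (fun c => pvKeep tf (pvFullName c))
    (fun c => (pvFullName c, pvColStr c)) cols []

-- both foreign-key loops build the same list
theorem pv_fk_fold (tf : Option (List String)) (fks : List (List (String × String)))
    (acc : List String) :
    fks.foldl (fun acc fk =>
        if pvTruthy tf && (!pvMem tf (pvFullName fk) || !pvMem tf (pvRefName fk)) then acc
        else acc ++ [pvFkLine fk]) acc =
      fks.foldl (fun acc fk =>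
        if pvKeep tf (pvFullName fk) && pvKeep tf (pvRefName fk) then acc ++ [pvFkLine fk]
        else acc) acc := by
  induction fks generalizing acc with
  | nil => rfl
  | cons fk rest ih =>
    have hA := pv_cond_fk tf (pvFullName fk) (pvRefName fk)
    by_cases h : (pvKeep tf (pvFullName fk) && pvKeep tf (pvRefName fk)) = true
    · simp only [List.foldl_cons, hA, h, Bool.not_true, Bool.false_eq_true, if_false, if_true]
      exact ih _
    · have h' : (pvKeep tf (pvFullName fk) && pvKeep tf (pvRefName fk)) = false := by simpa using h
      simp only [List.foldl_cons, hA, h', Bool.not_false, Bool.false_eq_true, if_false, if_true]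
      exact ih _

-- the sorted items of A's dict are B's sorted tables paired with their column lists
theorem pv_sorted_items (pairs : List (String × String)) :
    PySem.List.sorted
        (((pairs.foldl (fun d p => d.modify p.1 [] (fun v => v ++ [p.2]))
            (PySem.Dict.empty : PySem.Dict String (List String)))).items)
        (fun p => p.1) =
      (PySem.List.sorted (PySem.Set.ofList (pairs.map (·.1))) (fun t => t)).map
        (fun t => (t, (pairs.filter (fun p => p.1 == t)).map (·.2))) := by
  have hnd : ((pairs.foldl (fun d p => d.modify p.1 [] (fun v => v ++ [p.2]))
      (PySem.Dict.empty : PySem.Dict String (List String)))).keys.Nodup := by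
    exact PySem.Dict.nodup_keys_foldl_modify_key pairs (·.1) [] (fun _ p => (· ++ [p.2])) _
      (by simp)
  have hkeys : ((pairs.foldl (fun d p => d.modify p.1 [] (fun v => v ++ [p.2]))
      (PySem.Dict.empty : PySem.Dict String (List String)))).keys
      = PySem.Set.ofList (pairs.map (·.1)) := by
    rw [PySem.Dict.keys_foldl_modify_key pairs (·.1) [] (fun _ p => (· ++ [p.2]))]
    simp [PySem.Dict.keys_empty, PySem.Set.update_nil_left]
  have hitems : ((pairs.foldl (fun d p => d.modify p.1 [] (fun v => v ++ [p.2]))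
      (PySem.Dict.empty : PySem.Dict String (List String)))).items
      = (PySem.Set.ofList (pairs.map (·.1))).map
          (fun t => (t, (pairs.filter (fun p => p.1 == t)).map (·.2))) := by
    rw [PySem.Dict.items_eq_map_keys _ hnd [], hkeys]
    refine List.map_congr_left (fun t _ => ?_)
    rw [PySem.Dict.getD_foldl_modify_append pairs PySem.Dict.empty t]
    simp [PySem.Dict.getD_empty]
  rw [hitems]
  refine PySem.List.sorted_eq_of_perm_of_pairwise_lt _ _ _ ?_ ?_
  · exact List.Perm.map _ (PySem.List.sorted_perm _ _ _)
  · exact List.pairwise_map.mpr (PySem.List.sorted_ofList_pairwise_lt _)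

-- ===== VERDICT (by name: the statement is the Claim_ definition above) =====
theorem build_schema_card_spec : Claim_equal_build_schema_card := by
  intro columns fks tables_filter _ _
  unfold Spec_build_schema_card build_schema_card build_schema_card_alt
  dsimp only
  rw [pv_dict_fold, pv_pairs_fold, pv_fk_fold, pv_sorted_items, PySem.List.dedup_eq_ofList]
  simp [List.map_map, Function.comp_def]
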